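-- pv_equiv track=rewrite | github.com/danieleschmidt/agentic-startup-studio | scripts/release.py | determine_bump_type
-- ===== SOURCE A (Python) =====
-- from typing import Dict, List, Optional, Tuple
--
-- def determine_bump_type(commits: List[str]) -> str:
--     """Determine version bump type from commit messages."""
--     has_breaking = False
--     has_feature = False
--     has_fix = False
--
--     for commit in commits:
--         commit_lower = commit.lower()
--
--         # Check for breaking changes
--         if "breaking change" in commit_lower or "!" in commit:
--             has_breaking = True
--
--         # Check for features
--         if commit_lower.startswith(("feat:", "feature:")):
--             has_feature = True
--
--         # Check for fixes
--         if commit_lower.startswith(("fix:", "bugfix:", "hotfix:")):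
--             has_fix = True
--
--     if has_breaking:
--         return "major"
--     elif has_feature:
--         return "minor"
--     elif has_fix:
--         return "patch"
--     else:
--         return "patch"  # Default to patch for other changes
-- ===== SOURCE B (Python) =====
-- def determine_bump_type(commits):
--     """Determine version bump type from commit messages."""
--     if any("breaking change" in c.lower() or "!" in c for c in commits):
--         return "major"
--     if any(c.lower().startswith(("feat:", "feature:")) for c in commits):
--         return "minor"
--     return "patch"  # fixes and everything else bump the patch version
-- ===== Notes on version B (the rewrite author's own statement) =====
-- stated objective: simpler
-- what changed: Replaces the three accumulated flags and single full-scan loop with short-circuiting priority checks: one any() scan for breaking changes, then one for features, merging the fix case into the 'patch' default.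
import Mathlib
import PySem

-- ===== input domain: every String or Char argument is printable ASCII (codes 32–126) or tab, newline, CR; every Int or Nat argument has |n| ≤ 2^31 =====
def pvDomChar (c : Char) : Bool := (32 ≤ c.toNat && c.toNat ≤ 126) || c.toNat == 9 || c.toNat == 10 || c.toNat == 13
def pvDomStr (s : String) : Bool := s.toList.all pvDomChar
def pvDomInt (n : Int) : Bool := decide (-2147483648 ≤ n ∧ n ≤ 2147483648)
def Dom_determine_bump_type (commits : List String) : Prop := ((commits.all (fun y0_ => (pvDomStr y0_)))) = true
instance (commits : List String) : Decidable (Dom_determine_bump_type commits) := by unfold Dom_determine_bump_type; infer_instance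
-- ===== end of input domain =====

-- B replaces A's three accumulated flags and single loop by short-circuiting priority scans (simpler decomposition; same results).


-- ===== PORT A =====
def determine_bump_type (commits : List String) : String :=
  let st := commits.foldl (fun (st : Bool × Bool × Bool) commit =>
    let commit_lower := PySem.Str.lower commit
    -- Check for breaking changes
    let st := if PySem.Str.isIn "breaking change" commit_lower || PySem.Str.isIn "!" commit then (true, st.2) else st
    -- Check for features
    let st := if PySem.Str.startswith commit_lower "feat:" || PySem.Str.startswith commit_lower "feature:" then (st.1, true, st.2.2) else st
    -- Check for fixes
    let st := if PySem.Str.startswith commit_lower "fix:" || PySem.Str.startswith commit_lower "bugfix:" || PySem.Str.startswith commit_lower "hotfix:" then (st.1, st.2.1, true) else st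
    st) (false, false, false)
  if st.1 then "major"
  else if st.2.1 then "minor"
  else if st.2.2 then "patch"
  else "patch"  -- Default to patch for other changes

-- ===== PORT B =====
def determine_bump_type_alt (commits : List String) : String :=
  if commits.any (fun c => PySem.Str.isIn "breaking change" (PySem.Str.lower c) || PySem.Str.isIn "!" c) then "major"
  else if commits.any (fun c => PySem.Str.startswith (PySem.Str.lower c) "feat:" || PySem.Str.startswith (PySem.Str.lower c) "feature:") then "minor"
  else "patch"

-- ===== PRECONDITION & SPEC =====
def Spec_determine_bump_type (commits : List String) (out : String) : Prop := out = determine_bump_type_alt commits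
instance (commits : List String) (out : String) : Decidable (Spec_determine_bump_type commits out) := by unfold Spec_determine_bump_type; infer_instance

-- ===== CLAIM (what is proved, stated in full; the proofs are below) =====
def Claim_equal_determine_bump_type : Prop := ∀ (commits : List String), Dom_determine_bump_type commits → Spec_determine_bump_type commits (determine_bump_type commits)

-- ===== LEMMAS AND PROOFS =====

-- A's loop just accumulates the disjunction of each predicate over the list.
theorem foldl_flags (p q r : String → Bool) (l : List String) (b f x : Bool) :
    l.foldl (fun (st : Bool × Bool × Bool) c =>
      let st := if p c then (true, st.2) else st
      let st := if q c then (st.1, true, st.2.2) else st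
      if r c then (st.1, st.2.1, true) else st) (b, f, x)
    = (b || l.any p, f || l.any q, x || l.any r) := by
  induction l generalizing b f x with
  | nil => simp
  | cons hd tl ih =>
    simp only [List.foldl_cons, List.any_cons]
    by_cases hp : p hd <;> by_cases hq : q hd <;> by_cases hr : r hd <;>
      simp [hp, hq, hr, ih]

-- ===== VERDICT (by name: the statement is the Claim_ definition above) =====
theorem determine_bump_type_spec : Claim_equal_determine_bump_type := by
  intro commits _
  unfold Spec_determine_bump_type determine_bump_type determine_bump_type_alt
  rw [foldl_flags
    (fun c => PySem.Str.isIn "breaking change" (PySem.Str.lower c) || PySem.Str.isIn "!" c)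
    (fun c => PySem.Str.startswith (PySem.Str.lower c) "feat:" || PySem.Str.startswith (PySem.Str.lower c) "feature:")
    (fun c => PySem.Str.startswith (PySem.Str.lower c) "fix:" || PySem.Str.startswith (PySem.Str.lower c) "bugfix:" || PySem.Str.startswith (PySem.Str.lower c) "hotfix:")]
  simp only [Bool.false_or]
  cases h1 : commits.any (fun c => PySem.Str.isIn "breaking change" (PySem.Str.lower c) || PySem.Str.isIn "!" c) <;>
  cases h2 : commits.any (fun c => PySem.Str.startswith (PySem.Str.lower c) "feat:" || PySem.Str.startswith (PySem.Str.lower c) "feature:") <;>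
  cases h3 : commits.any (fun c => PySem.Str.startswith (PySem.Str.lower c) "fix:" || PySem.Str.startswith (PySem.Str.lower c) "bugfix:" || PySem.Str.startswith (PySem.Str.lower c) "hotfix:") <;>
  simp [h1, h2, h3]
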